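-- pv_equiv track=rewrite | github.com/JacopoDapueto/transfer_disentanglement | src/data/datasets/texture_dsprites.py | classes_to_index
-- ===== SOURCE A (Python) =====
-- def classes_to_index(sizes, labels):
--     """
--     Given a list of class sizes and a corresponding list of labels, return the index of the image.
--
--     :param sizes: List of sizes representing the number of classes for each attribute.
--     :param labels: List of class labels (one for each attribute).
--     :return: Index of the image corresponding to the class labels.
--     """
--     assert len(sizes) == len(labels), "Sizes and labels must have the same length."
--
--     index = 0
--     # Multiply class labels with the product of all subsequent sizes
--     product = 1
--     for i in reversed(range(len(sizes))):
--         index += labels[i] * product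
--         product *= sizes[i]
--
--     return index
-- ===== SOURCE B (Python) =====
-- def classes_to_index(sizes, labels):
--     """
--     Given a list of class sizes and a corresponding list of labels, return the index of the image.
--
--     :param sizes: List of sizes representing the number of classes for each attribute.
--     :param labels: List of class labels (one for each attribute).
--     :return: Index of the image corresponding to the class labels.
--     """
--     assert len(sizes) == len(labels), "Sizes and labels must have the same length."
--
--     index = 0
--     # Horner's method over the paired (size, label) attributes; no index arithmetic
--     for size, label in zip(sizes, labels):
--         index = index * size + label
--
--     return index
-- ===== Notes on version B (the rewrite author's own statement) =====
-- stated objective: idiomatic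
-- what changed: Replaces the index-based reversed loop maintaining an explicit trailing-size product with a forward Horner accumulation over zip(sizes, labels), eliminating all subscripting and the product variable.
import Mathlib
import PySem

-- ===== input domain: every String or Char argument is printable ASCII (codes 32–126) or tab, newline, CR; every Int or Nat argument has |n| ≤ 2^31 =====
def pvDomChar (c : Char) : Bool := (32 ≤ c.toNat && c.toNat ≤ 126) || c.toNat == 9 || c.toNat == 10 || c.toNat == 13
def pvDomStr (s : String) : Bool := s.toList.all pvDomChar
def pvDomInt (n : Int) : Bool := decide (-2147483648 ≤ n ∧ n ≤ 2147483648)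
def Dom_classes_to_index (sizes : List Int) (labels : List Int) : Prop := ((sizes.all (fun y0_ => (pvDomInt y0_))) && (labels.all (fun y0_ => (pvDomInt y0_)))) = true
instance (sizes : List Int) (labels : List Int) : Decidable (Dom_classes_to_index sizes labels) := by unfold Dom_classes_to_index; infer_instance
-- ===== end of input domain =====

-- B replaces A's index-based reversed loop (explicit trailing-size product) by a forward Horner accumulation over the zipped (size, label) pairs (idiomatic).


-- ===== PORT A =====
-- A's loop: for i in reversed(range(len(sizes))): index += labels[i]*product; product *= sizes[i]
def pvAFold (sizes labels : List Int) (l : List Nat) (st : Int × Int) : Int × Int :=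
  l.foldl (fun st i =>
    (st.1 + PySem.List.pyGetD labels (Int.ofNat i) 0 * st.2,
     st.2 * PySem.List.pyGetD sizes (Int.ofNat i) 0)) st

def classes_to_index (sizes : List Int) (labels : List Int) : Int :=
  (pvAFold sizes labels ((List.range sizes.length).reverse) (0, 1)).1

-- ===== PORT B =====
-- B's loop 'for size, label in zip(sizes, labels): index = index*size + label'
-- as the obvious structural recursion over the zipped pair list
def pvHorner : List (Int × Int) → Int → Int
  | [], index => index
  | (size, label) :: ps, index => pvHorner ps (index * size + label)

def classes_to_index_alt (sizes : List Int) (labels : List Int) : Int :=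
  pvHorner (sizes.zip labels) 0

-- ===== PRECONDITION & SPEC =====
-- A's assert raises AssertionError when the lengths differ; Pre_ excludes exactly those inputs.
def Pre_classes_to_index (sizes : List Int) (labels : List Int) : Prop :=
  sizes.length = labels.length
instance (sizes : List Int) (labels : List Int) : Decidable (Pre_classes_to_index sizes labels) := by
  unfold Pre_classes_to_index; infer_instance

def pvWitness_classes_to_index : List Int × List Int := ([3, 6, 40], [1, 2, 5])

def Spec_classes_to_index (sizes : List Int) (labels : List Int) (out : Int) : Prop := out = classes_to_index_alt sizes labels
instance (sizes : List Int) (labels : List Int) (out : Int) : Decidable (Spec_classes_to_index sizes labels out) := by unfold Spec_classes_to_index; infer_instance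

-- ===== CLAIM (what is proved, stated in full; the proofs are below) =====
def Claim_equal_classes_to_index : Prop := ∀ (sizes : List Int) (labels : List Int), Dom_classes_to_index sizes labels → Pre_classes_to_index sizes labels → Spec_classes_to_index sizes labels (classes_to_index sizes labels)

-- ===== LEMMAS AND PROOFS =====
-- pvHorner is the tail-recursive form of a foldl
theorem pvHorner_eq_foldl (ps : List (Int × Int)) (a : Int) :
    pvHorner ps a = ps.foldl (fun acc p => acc * p.1 + p.2) a := by
  induction ps generalizing a with
  | nil => rfl
  | cons p ps ih => cases p; simp [pvHorner, ih]

-- running product of sizes[0..n)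
def pvProd (sizes : List Int) (l : List Nat) : Int :=
  l.foldl (fun p i => p * PySem.List.pyGetD sizes (Int.ofNat i) 0) 1

theorem pvProd_append (sizes : List Int) (l : List Nat) (i : Nat) :
    pvProd sizes (l ++ [i]) = pvProd sizes l * PySem.List.pyGetD sizes (Int.ofNat i) 0 := by
  simp [pvProd, List.foldl_append]

-- the key invariant: folding A's loop over reversed(range n) from (a, p) yields
-- (a + p * Horner-value of the first n zipped pairs, p * product of the first n sizes)
theorem pvAFold_reverse_range (sizes labels : List Int) (n : Nat)
    (hs : n ≤ sizes.length) (hl : n ≤ labels.length) (a p : Int) :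
    pvAFold sizes labels ((List.range n).reverse) (a, p) =
      (a + p * pvHorner ((sizes.zip labels).take n) 0,
       p * pvProd sizes (List.range n)) := by
  induction n generalizing a p with
  | zero => simp [pvAFold, pvHorner, pvProd]
  | succ n ih =>
    have hn : n < (sizes.zip labels).length := by
      simp [List.length_zip]; omega
    have hrev : ((List.range (n+1)).reverse) = n :: (List.range n).reverse := by
      simp [List.range_succ]
    rw [hrev]
    have hstep : pvAFold sizes labels (n :: (List.range n).reverse) (a, p) =
        pvAFold sizes labels ((List.range n).reverse)
          (a + PySem.List.pyGetD labels (Int.ofNat n) 0 * p,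
           p * PySem.List.pyGetD sizes (Int.ofNat n) 0) := by
      simp [pvAFold]
    rw [hstep, ih (by omega) (by omega)]
    have htake : (sizes.zip labels).take (n+1) =
        (sizes.zip labels).take n ++ [(sizes[n]'(by omega), labels[n]'(by omega))] := by
      rw [List.take_add_one]
      simp [List.getElem?_eq_getElem hn]
    rw [List.range_succ, pvProd_append, htake, pvHorner_eq_foldl, pvHorner_eq_foldl,
        List.foldl_append]
    have hgs : PySem.List.pyGetD sizes (Int.ofNat n) 0 = sizes[n]'(by omega) := by
      rw [show (Int.ofNat n) = ((n : Nat) : Int) from rfl, PySem.List.pyGetD_natCast,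
          List.getD_eq_getElem _ _ (by omega)]
    have hgl : PySem.List.pyGetD labels (Int.ofNat n) 0 = labels[n]'(by omega) := by
      rw [show (Int.ofNat n) = ((n : Nat) : Int) from rfl, PySem.List.pyGetD_natCast,
          List.getD_eq_getElem _ _ (by omega)]
    simp only [hgs, hgl, List.foldl_cons, List.foldl_nil, Prod.mk.injEq]
    constructor <;> ring

-- ===== VERDICT (by name: the statement is the Claim_ definition above) =====
theorem classes_to_index_spec : Claim_equal_classes_to_index := by
  intro sizes labels _ hpre
  unfold Spec_classes_to_index classes_to_index classes_to_index_alt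
  rw [pvAFold_reverse_range sizes labels sizes.length le_rfl (le_of_eq hpre)]
  have : (sizes.zip labels).take sizes.length = sizes.zip labels := by
    apply List.take_of_length_le
    simp [List.length_zip]
  rw [this]
  simp
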